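-- pv_equiv track=rewrite | github.com/yyu6969/verl | experiments/save_sequence_prompts.py | generate_sequence_prompts
-- ===== SOURCE A (Python) =====
-- def generate_sequence_prompts(max_length=10, step=1):
--     """
--     Generate a list of prompts with increasing Fibonacci sequence length
--     """
--     prompts = []
--
--     # Generate Fibonacci sequence
--     fib = [0, 1]
--     for i in range(2, 1025):  # Generate up to 1025 Fibonacci numbers
--         fib.append(fib[i-1] + fib[i-2])
--
--     # Create prompts with increasing sequence length
--     for length in range(1, max_length + 1, step):
--         sequence = ', '.join(str(fib[i]) for i in range(length))
--         prompt = f"{sequence}, what is the next number?"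
--         prompts.append(prompt)
--
--     return prompts
-- ===== SOURCE B (Python) =====
-- def generate_sequence_prompts(max_length=10, step=1):
--     """
--     Generate a list of prompts with increasing Fibonacci sequence length
--     """
--     lengths = range(1, max_length + 1, step)
--     top = max(lengths, default=0)
--
--     # Comma-joined prefix of the sequence for each length, built once, incrementally.
--     prefixes = {0: ""}
--     prefix = ""
--     a, b = 0, 1
--     for i in range(top):
--         prefix = str(a) if i == 0 else prefix + ", " + str(a)
--         prefixes[i + 1] = prefix
--         a, b = b, a + b
--
--     return [prefixes.get(length, "") + ", what is the next number?" for length in lengths]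
-- ===== Notes on version B (the rewrite author's own statement) =====
-- stated objective: faster
-- what changed: B replaces A's per-prompt rebuild (re-rendering and re-joining str(fib[i]) over range(length) for every length) by rendering each Fibonacci number once while extending a comma-joined prefix incrementally into a dict keyed by length, and each prompt is a dict lookup; Pre_ excludes only inputs where A raises (step=0: ValueError; positive step whose largest length exceeds 1025: IndexError).
import Mathlib
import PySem

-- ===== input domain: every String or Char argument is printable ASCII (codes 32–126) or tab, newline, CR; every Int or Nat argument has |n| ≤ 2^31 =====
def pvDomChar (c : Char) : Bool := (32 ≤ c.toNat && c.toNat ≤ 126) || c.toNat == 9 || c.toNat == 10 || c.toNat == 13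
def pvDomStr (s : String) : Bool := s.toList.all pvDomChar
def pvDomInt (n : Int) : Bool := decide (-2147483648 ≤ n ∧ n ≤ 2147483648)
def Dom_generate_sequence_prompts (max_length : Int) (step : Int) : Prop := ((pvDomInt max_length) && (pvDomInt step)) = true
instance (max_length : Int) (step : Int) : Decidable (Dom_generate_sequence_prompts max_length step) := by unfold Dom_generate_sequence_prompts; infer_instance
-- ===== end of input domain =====

-- B renders each Fibonacci number once and extends a comma-joined prefix incrementally into a
-- dict keyed by length, instead of re-rendering and re-joining every prompt from scratch (objective: faster).

-- ===== PORT A =====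
def generate_sequence_prompts (max_length : Int) (step : Int) : List String :=
  let fib := (PySem.List.pyRange 2 1025 1).foldl
      (fun fib i => fib ++ [PySem.List.pyGetD fib (i-1) 0 + PySem.List.pyGetD fib (i-2) 0])
      [0, 1]
  (PySem.List.pyRange 1 (max_length + 1) step).foldl
      (fun prompts length =>
        let sequence := PySem.Str.join ", " ((PySem.List.pyRange 0 length 1).map
            (fun i => PySem.Int.toStr (PySem.List.pyGetD fib i 0)))
        prompts ++ [sequence ++ ", what is the next number?"])
      []

-- ===== PORT B =====
def generate_sequence_prompts_alt (max_length : Int) (step : Int) : List String :=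
  let lengths := PySem.List.pyRange 1 (max_length + 1) step
  let top := PySem.List.maxD lengths (fun x => x) 0
  let st := (PySem.List.pyRange 0 top 1).foldl
      (fun (st : PySem.Dict Int String × String × Int × Int) i =>
        let pre := if i = 0 then PySem.Int.toStr st.2.2.1
                   else st.2.1 ++ ", " ++ PySem.Int.toStr st.2.2.1
        (st.1.insert (i+1) pre, pre, st.2.2.2, st.2.2.1 + st.2.2.2))
      (PySem.Dict.ofList [((0 : Int), "")], "", 0, 1)
  lengths.map (fun l => st.1.getD l "" ++ ", what is the next number?")

-- ===== PRECONDITION & SPEC =====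
-- Pre_ excludes only inputs on which A raises: step = 0 (ValueError in range) and positive steps
-- whose largest generated sequence length exceeds 1025 (IndexError on fib); A returns everywhere else.
def Pre_generate_sequence_prompts (max_length : Int) (step : Int) : Prop :=
  step ≠ 0 ∧ (0 < step → step * PySem.Int.floordiv (max_length - 1) step ≤ 1024)
instance (max_length : Int) (step : Int) : Decidable (Pre_generate_sequence_prompts max_length step) := by
  unfold Pre_generate_sequence_prompts; infer_instance

def pvWitness_generate_sequence_prompts : Int × Int := (10, 1)

def Spec_generate_sequence_prompts (max_length : Int) (step : Int) (out : List String) : Prop := out = generate_sequence_prompts_alt max_length step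
instance (max_length : Int) (step : Int) (out : List String) : Decidable (Spec_generate_sequence_prompts max_length step out) := by unfold Spec_generate_sequence_prompts; infer_instance

-- ===== CLAIM (what is proved, stated in full; the proofs are below) =====
def Claim_equal_generate_sequence_prompts : Prop := ∀ (max_length : Int) (step : Int), Dom_generate_sequence_prompts max_length step → Pre_generate_sequence_prompts max_length step → Spec_generate_sequence_prompts max_length step (generate_sequence_prompts max_length step)

-- ===== LEMMAS AND PROOFS =====

/-- The mathematical Fibonacci sequence both programs compute. -/
def pvFib : Nat → Int
  | 0 => 0
  | 1 => 1
  | n+2 => pvFib n + pvFib (n+1)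

/-- The comma-joined prefix of length `k`. -/
def pvJ (k : Nat) : String :=
  PySem.Str.join ", " ((List.range k).map fun j => PySem.Int.toStr (pvFib j))

/-- The dict B has built after `n` loop iterations. -/
def pvDictN (n : Nat) : PySem.Dict Int String :=
  ⟨(List.range (n+1)).map fun k : Nat => ((k : Int), pvJ k)⟩

lemma pvJ_zero : pvJ 0 = "" := by
  apply String.toList_inj.mp
  simp [pvJ, PySem.Str.toList_join, PySem.Chars.join_nil]

lemma pv_fibfold (n : Nat) :
    (PySem.List.pyRange 2 (2 + (n : Int)) 1).foldl
      (fun fib i => fib ++ [PySem.List.pyGetD fib (i-1) 0 + PySem.List.pyGetD fib (i-2) 0])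
      [0, 1] = (List.range (2+n)).map pvFib := by
  induction n with
  | zero =>
      rw [show ((2:Int) + (0:Nat) = 2) by norm_num, PySem.List.pyRange_one_eq_nil le_rfl]
      simp [List.range_succ, pvFib]
  | succ n ih =>
      rw [show ((2:Int) + ((n+1 : Nat) : Int) = (2 + (n:Int)) + 1) by omega,
          PySem.List.pyRange_one_succ_right (by omega), List.foldl_append, ih]
      simp only [List.foldl_cons, List.foldl_nil]
      rw [show (2 + (n:Int) - 1 = ((n+1 : Nat) : Int)) by omega,
          show (2 + (n:Int) - 2 = ((n : Nat) : Int)) by omega,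
          PySem.List.pyGetD_natCast, PySem.List.pyGetD_natCast]
      rw [show (2+(n+1)) = (2+n)+1 by ring, List.range_succ, List.map_append]
      congr 1
      rw [PySem.List.getD_map_range pvFib (2+n) (n+1) 0 (by omega),
          PySem.List.getD_map_range pvFib (2+n) n 0 (by omega),
          show (2+n) = n+2 by ring]
      simp [pvFib]; ring

lemma pv_join_append (sep x : List Char) (xs : List (List Char)) (h : xs ≠ []) :
    PySem.Chars.join sep (xs ++ [x]) = PySem.Chars.join sep xs ++ sep ++ x := by
  induction xs with
  | nil => exact absurd rfl h
  | cons a tl ih =>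
      cases tl with
      | nil => simp [PySem.Chars.join_cons_cons, PySem.Chars.join_singleton]
      | cons b tl2 =>
          have h0 : (a :: b :: tl2) ++ [x] = a :: b :: (tl2 ++ [x]) := by simp
          rw [h0, PySem.Chars.join_cons_cons, ← List.cons_append, ih (by simp),
              PySem.Chars.join_cons_cons]
          simp [List.append_assoc]

lemma pvJ_succ (n : Nat) :
    pvJ (n+1) = if n = 0 then PySem.Int.toStr (pvFib 0)
                else pvJ n ++ ", " ++ PySem.Int.toStr (pvFib n) := by
  apply String.toList_inj.mp
  cases n with
  | zero => simp [pvJ, PySem.Str.toList_join, PySem.Chars.join_singleton]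
  | succ m =>
      rw [if_neg (by omega)]
      simp only [pvJ, String.toList_append, PySem.Str.toList_join, List.range_succ,
        List.map_append, List.map_cons, List.map_nil]
      rw [pv_join_append _ _ _ (by simp)]

lemma pv_mem_keys_pvDictN (n : Nat) (l : Int) :
    l ∈ (pvDictN n).keys ↔ 0 ≤ l ∧ l ≤ (n : Int) := by
  simp only [pvDictN, PySem.Dict.keys_mk, List.map_map, List.mem_map, Function.comp,
    List.mem_range]
  constructor
  · rintro ⟨k, hk, rfl⟩; omega
  · intro h; exact ⟨l.toNat, by omega, by omega⟩

lemma pv_nodup_keys_pvDictN (n : Nat) : (pvDictN n).keys.Nodup := by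
  simp only [pvDictN, PySem.Dict.keys_mk, List.map_map]
  exact List.Nodup.map (fun a b h => by simpa using h) List.nodup_range

lemma pv_contains_pvDictN (n : Nat) (l : Int) :
    (pvDictN n).contains l = decide (0 ≤ l ∧ l ≤ (n : Int)) := by
  rw [PySem.Dict.contains_eq_decide_mem_keys]
  simp only [pv_mem_keys_pvDictN n l]

lemma pv_getD_pvDictN (n : Nat) (l : Int) :
    (pvDictN n).getD l "" = if 0 ≤ l ∧ l ≤ (n : Int) then pvJ l.toNat else "" := by
  by_cases h : 0 ≤ l ∧ l ≤ (n : Int)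
  · rw [if_pos h]
    refine PySem.Dict.getD_of_mem_items _ ?_ (pv_nodup_keys_pvDictN n) ""
    show (l, pvJ l.toNat) ∈ (List.range (n+1)).map fun k : Nat => ((k : Int), pvJ k)
    exact List.mem_map.mpr ⟨l.toNat, List.mem_range.mpr (by omega), by rw [Int.toNat_of_nonneg h.1]⟩
  · rw [if_neg h]
    exact PySem.Dict.getD_of_not_contains _ _ (by rw [pv_contains_pvDictN, decide_eq_false h])

lemma pv_insert_pvDictN (n : Nat) :
    (pvDictN n).insert ((n : Int) + 1) (pvJ (n+1)) = pvDictN (n+1) := by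
  apply PySem.Dict.ext
  rw [PySem.Dict.items_insert_of_not_contains _ _
        (by rw [pv_contains_pvDictN, decide_eq_false (by omega)])]
  show ((List.range (n+1)).map fun k : Nat => ((k : Int), pvJ k)) ++ _
      = (List.range (n+1+1)).map fun k : Nat => ((k : Int), pvJ k)
  rw [List.range_succ (n := n+1), List.map_append]
  simp

lemma pv_loop (n : Nat) :
    (PySem.List.pyRange 0 (n : Int) 1).foldl
      (fun (st : PySem.Dict Int String × String × Int × Int) i =>
        let pre := if i = 0 then PySem.Int.toStr st.2.2.1
                   else st.2.1 ++ ", " ++ PySem.Int.toStr st.2.2.1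
        (st.1.insert (i+1) pre, pre, st.2.2.2, st.2.2.1 + st.2.2.2))
      (PySem.Dict.ofList [((0 : Int), "")], "", 0, 1)
    = (pvDictN n, pvJ n, pvFib n, pvFib (n+1)) := by
  induction n with
  | zero =>
      rw [show (((0 : Nat) : Int)) = 0 by norm_num, PySem.List.pyRange_one_eq_nil le_rfl]
      simp only [List.foldl_nil]
      refine Prod.ext ?_ (Prod.ext pvJ_zero.symm rfl)
      apply PySem.Dict.ext
      show [((0 : Int), "")] = (List.range 1).map fun k : Nat => ((k : Int), pvJ k)
      simp [pvJ_zero]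
  | succ n ih =>
      rw [show (((n+1 : Nat) : Int) = (n : Int) + 1) by omega,
          PySem.List.pyRange_one_succ_right (by positivity), List.foldl_append, ih]
      simp only [List.foldl_cons, List.foldl_nil]
      have hpre : (if (n : Int) = 0 then PySem.Int.toStr (pvFib n)
            else pvJ n ++ ", " ++ PySem.Int.toStr (pvFib n)) = pvJ (n+1) := by
        rw [pvJ_succ n]
        by_cases h0 : n = 0
        · subst h0; norm_num
        · rw [if_neg (by exact_mod_cast h0), if_neg h0]
      refine Prod.ext ?_ (Prod.ext ?_ ?_)
      · show (pvDictN n).insert ((n : Int) + 1) _ = _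
        rw [hpre, pv_insert_pvDictN]
      · exact hpre
      · show (pvFib (n+1), pvFib n + pvFib (n+1)) = (pvFib (n+1), pvFib (n+2))
        rw [show pvFib (n+2) = pvFib n + pvFib (n+1) from rfl]

lemma pv_A_elem (l : Int) (hl : l ≤ 1025) :
    PySem.Str.join ", " ((PySem.List.pyRange 0 l 1).map
        fun i => PySem.Int.toStr (PySem.List.pyGetD ((List.range 1025).map pvFib) i 0))
    = pvJ l.toNat := by
  rw [PySem.List.pyRange_one 0 l]
  unfold pvJ
  congr 1
  rw [List.map_map, show (l - 0).toNat = l.toNat by omega]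
  apply List.map_congr_left
  intro k hk
  simp only [Function.comp_apply, zero_add, PySem.List.pyGetD_natCast]
  rw [PySem.List.getD_map_range pvFib 1025 k 0 (by simp at hk; omega)]

lemma pv_mem_pyRange_neg {a b s x : Int} (hs : s < 0) (hx : x ∈ PySem.List.pyRange a b s) :
    x ≤ a ∧ b < a := by
  simp only [PySem.List.pyRange, if_neg (by omega : ¬ s = 0), if_neg (by omega : ¬ 0 < s)] at hx
  by_cases hba : b < a
  · rw [if_pos hba] at hx
    simp only [List.mem_map, List.mem_range] at hx
    obtain ⟨k, -, rfl⟩ := hx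
    exact ⟨by nlinarith [Int.natCast_nonneg k], hba⟩
  · rw [if_neg hba] at hx
    simp at hx

lemma pv_start_mem_pyRange_neg {a b s : Int} (hs : s < 0)
    (h : PySem.List.pyRange a b s ≠ []) : a ∈ PySem.List.pyRange a b s := by
  simp only [PySem.List.pyRange, if_neg (by omega : ¬ s = 0), if_neg (by omega : ¬ 0 < s)] at h ⊢
  by_cases hba : b < a
  · rw [if_pos hba] at h ⊢
    rcases Nat.eq_zero_or_pos (((a - b + -s - 1) / -s).toNat) with h0 | h0
    · rw [h0] at h; simp at h
    · exact List.mem_map.mpr ⟨0, List.mem_range.mpr h0, by ring⟩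
  · rw [if_neg hba] at h; simp at h

-- ===== VERDICT (by name: the statement is the Claim_ definition above) =====
theorem generate_sequence_prompts_spec : Claim_equal_generate_sequence_prompts := by
  intro max_length step hdom hpre
  obtain ⟨hs0, hbound⟩ := hpre
  unfold Spec_generate_sequence_prompts generate_sequence_prompts generate_sequence_prompts_alt
  simp only []
  have hfib : (PySem.List.pyRange 2 1025 1).foldl
      (fun fib i => fib ++ [PySem.List.pyGetD fib (i-1) 0 + PySem.List.pyGetD fib (i-2) 0])
      [0, 1] = (List.range 1025).map pvFib := by
    have h := pv_fibfold 1023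
    norm_num at h
    exact h
  rw [hfib]
  set lengths := PySem.List.pyRange 1 (max_length + 1) step with hlen_def
  set top : Int := PySem.List.maxD lengths (fun x => x) 0 with htop_def
  -- every member of lengths is at most top, and top is 0 or a member
  have hmax : ∀ l ∈ lengths, l ≤ top := by
    intro l hl
    rcases hmx : PySem.List.max? lengths (fun x => x) with _ | m
    · rw [PySem.List.max?_eq_none_iff] at hmx
      rw [hmx] at hl; simp at hl
    · have := PySem.List.max?_isMax hmx l hl
      rw [htop_def, PySem.List.maxD, hmx]
      exact this
  have htop_cases : top = 0 ∨ top ∈ lengths := by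
    rcases hmx : PySem.List.max? lengths (fun x => x) with _ | m
    · left; rw [htop_def, PySem.List.maxD, hmx]; rfl
    · right; rw [htop_def, PySem.List.maxD, hmx]; exact PySem.List.max?_mem hmx
  -- bounds on the members of lengths
  have hmem_bounds : ∀ l ∈ lengths, l ≤ 1025 := by
    intro l hl
    rcases lt_or_gt_of_ne hs0 with hneg | hpos
    · have := pv_mem_pyRange_neg hneg hl
      omega
    · obtain ⟨h1, h2, hdvd⟩ := (PySem.List.mem_pyRange_iff_of_pos hpos l).1 hl
      obtain ⟨t, ht⟩ := hdvd
      have hml : 1 ≤ max_length := by omega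
      have ht0 : 0 ≤ t := by nlinarith
      have hta : t ≤ PySem.Int.floordiv (max_length - 1) step :=
        (PySem.Int.le_floordiv_iff_mul_le hpos).2 (by nlinarith)
      have hfd : step * PySem.Int.floordiv (max_length - 1) step ≤ 1024 := hbound hpos
      nlinarith
  have htop0 : 0 ≤ top := by
    rcases htop_cases with h0 | hm
    · omega
    · rcases lt_or_gt_of_ne hs0 with hneg | hpos
      · have hne : lengths ≠ [] := List.ne_nil_of_mem hm
        have h1 : (1 : Int) ∈ lengths := by
          rw [hlen_def]
          exact pv_start_mem_pyRange_neg hneg (by rw [← hlen_def]; exact hne)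
        have := hmax 1 h1
        omega
      · have := (PySem.List.mem_pyRange_iff_of_pos hpos top).1 hm
        omega
  obtain ⟨n, hn⟩ : ∃ n : Nat, top = (n : Int) := ⟨top.toNat, (Int.toNat_of_nonneg htop0).symm⟩
  rw [hn, pv_loop n]
  simp only []
  rw [PySem.List.foldl_append_singleton_eq_map _ _ []]
  rw [List.nil_append]
  apply List.map_congr_left
  intro l hl
  refine congrArg (· ++ ", what is the next number?") ?_
  rw [pv_A_elem l (hmem_bounds l hl), pv_getD_pvDictN n l]
  by_cases h0 : 0 ≤ l
  · rw [if_pos ⟨h0, hn ▸ hmax l hl⟩]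
  · rw [if_neg (by omega), show l.toNat = 0 by omega, pvJ_zero]
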